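-- pv_equiv track=rewrite | github.com/ahsan-007/Competitive-Programming | Daily Streak/Medium/MinimumRemovalsToBalanceArray.py | minRemovalV2
-- ===== SOURCE A (Python) =====
-- from typing import List
--
-- def minRemovalV2(nums: List[int], k: int) -> int:
--     nums.sort()
--     i = 0
--     j = 0
--     maxCount = 0
--     while j < len(nums):
--         if i == j or nums[j] <= nums[i] * k:
--             maxCount = max(maxCount, j - i + 1)
--             j = j + 1
--         else:
--             i = i + 1
--     return len(nums) - maxCount
-- ===== SOURCE B (Python) =====
-- from typing import List
--
-- def _bisect_right(a: List[int], x: int) -> int: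
--     lo, hi = 0, len(a)
--     while lo < hi:
--         mid = (lo + hi) // 2
--         if x < a[mid]:
--             hi = mid
--         else:
--             lo = mid + 1
--     return lo
--
-- def minRemovalV2(nums: List[int], k: int) -> int:
--     nums.sort()
--     maxCount = 0
--     for i in range(len(nums)):
--         right = _bisect_right(nums, nums[i] * k)
--         maxCount = max(maxCount, max(1, right - i))
--     return len(nums) - maxCount
-- ===== Notes on version B (the rewrite author's own statement) =====
-- stated objective: alternative
-- what changed: Replaces the two-pointer sliding window over the sorted array with an independent per-left-endpoint binary search (hand-written bisect_right) for the window's right boundary, clamped to at least 1 for the always-valid singleton window.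
import Mathlib
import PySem

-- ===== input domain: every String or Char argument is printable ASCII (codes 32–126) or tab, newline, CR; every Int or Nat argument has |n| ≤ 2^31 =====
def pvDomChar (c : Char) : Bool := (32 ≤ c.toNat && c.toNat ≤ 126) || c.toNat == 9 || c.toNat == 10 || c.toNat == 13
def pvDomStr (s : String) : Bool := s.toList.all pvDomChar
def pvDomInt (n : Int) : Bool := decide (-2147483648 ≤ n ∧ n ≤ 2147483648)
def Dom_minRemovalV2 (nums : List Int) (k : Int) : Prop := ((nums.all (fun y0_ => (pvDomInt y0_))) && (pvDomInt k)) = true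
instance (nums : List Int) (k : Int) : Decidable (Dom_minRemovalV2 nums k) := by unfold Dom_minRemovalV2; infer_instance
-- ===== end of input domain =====

-- B replaces A's two-pointer sliding window by a per-left-endpoint binary search over the
-- sorted array (objective: alternative algorithm, similar cost). Both A and B sort `nums`
-- in place in Python; the equivalence proved here is about the return value.


-- ===== PORT A =====
-- A's while-loop; i, j start at 0 and only grow, so they are Nats; list indexing is via
-- List.getD _ 0, exact here because the loop only reads indices < s.length (i ≤ j < length).
-- The inner `if _hij : i < j` is a totality guard only: whenever the window test fails we
-- have i ≠ j (hence i < j, as i ≤ j on every reachable state), so the `else` is unreachable.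
def minRemovalV2Loop (s : List Int) (k : Int) (i j : Nat) (maxCount : Int) : Int :=
  if _h : j < s.length then
    if i = j ∨ s.getD j 0 ≤ s.getD i 0 * k then
      minRemovalV2Loop s k i (j + 1) (max maxCount ((j : Int) - (i : Int) + 1))
    else
      if _hij : i < j then minRemovalV2Loop s k (i + 1) j maxCount
      else maxCount
  else maxCount
termination_by (s.length - i, s.length - j)
decreasing_by
  · exact Prod.Lex.right _ (by omega)
  · exact Prod.Lex.left _ _ (by omega)

def minRemovalV2 (nums : List Int) (k : Int) : Int :=
  let s := PySem.List.sorted nums (fun x => x)   -- nums.sort()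
  (s.length : Int) - minRemovalV2Loop s k 0 0 0

-- ===== PORT B =====
-- Source B's hand-written _bisect_right: binary search loop, transcribed as recursion on hi - lo.
-- mid = (lo + hi) // 2 is inlined (same value as Source B's local variable)
def bisectRightAux (a : List Int) (x : Int) (lo hi : Nat) : Nat :=
  if lo < hi then
    if x < a.getD ((lo + hi) / 2) 0 then bisectRightAux a x lo ((lo + hi) / 2)
    else bisectRightAux a x ((lo + hi) / 2 + 1) hi
  else lo
termination_by hi - lo
decreasing_by all_goals omega

def bisectRightB (a : List Int) (x : Int) : Nat := bisectRightAux a x 0 a.length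

def minRemovalV2_alt (nums : List Int) (k : Int) : Int :=
  let s := PySem.List.sorted nums (fun x => x)   -- nums.sort()
  (s.length : Int) -
    (List.range s.length).foldl
      (fun maxCount i =>
        max maxCount (max 1 ((bisectRightB s (s.getD i 0 * k) : Int) - (i : Int)))) 0

-- ===== PRECONDITION & SPEC =====
def Spec_minRemovalV2 (nums : List Int) (k : Int) (out : Int) : Prop := out = minRemovalV2_alt nums k
instance (nums : List Int) (k : Int) (out : Int) : Decidable (Spec_minRemovalV2 nums k out) := by unfold Spec_minRemovalV2; infer_instance

-- ===== CLAIM (what is proved, stated in full; the proofs are below) =====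
def Claim_equal_minRemovalV2 : Prop := ∀ (nums : List Int) (k : Int), Dom_minRemovalV2 nums k → Spec_minRemovalV2 nums k (minRemovalV2 nums k)

-- ===== LEMMAS AND PROOFS =====

-- proof-side abbreviations for B's per-index window size and its running maximum
def gB (s : List Int) (k : Int) (i : Nat) : Int :=
  max 1 ((bisectRightB s (s.getD i 0 * k) : Int) - (i : Int))

def foldB (s : List Int) (k : Int) : Int :=
  (List.range s.length).foldl (fun m i => max m (gB s k i)) 0

-- generic foldl-max facts
lemma foldl_max_init_le (f : Nat → Int) (l : List Nat) (a : Int) :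
    a ≤ l.foldl (fun m x => max m (f x)) a := by
  induction l generalizing a with
  | nil => simp
  | cons y t ih => exact le_trans (le_max_left _ _) (ih _)

lemma foldl_max_arg_le (f : Nat → Int) (l : List Nat) (a : Int) {x : Nat} (hx : x ∈ l) :
    f x ≤ l.foldl (fun m x => max m (f x)) a := by
  induction l generalizing a with
  | nil => simp at hx
  | cons y t ih =>
    rcases List.mem_cons.mp hx with h | h
    · subst h; exact le_trans (le_max_right _ _) (foldl_max_init_le f t _)
    · exact ih _ h

lemma foldl_max_le (f : Nat → Int) (l : List Nat) (a c : Int)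
    (h : ∀ x ∈ l, f x ≤ c) (ha : a ≤ c) :
    l.foldl (fun m x => max m (f x)) a ≤ c := by
  induction l generalizing a with
  | nil => simpa using ha
  | cons y t ih =>
    exact ih _ (fun x hx => h x (List.mem_cons_of_mem _ hx))
      (max_le ha (h y (List.mem_cons_self)))

-- sorted monotonicity via getD
lemma sorted_getD_mono (s : List Int) (hs : List.Pairwise (· ≤ ·) s)
    {p q : Nat} (hpq : p ≤ q) (hq : q < s.length) :
    s.getD p 0 ≤ s.getD q 0 := by
  rcases Nat.lt_or_ge p q with h | h
  · rw [List.getD_eq_getElem _ _ (lt_trans h hq), List.getD_eq_getElem _ _ hq]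
    exact List.pairwise_iff_getElem.mp hs p q _ _ h
  · have : p = q := le_antisymm hpq h
    subst this; rfl

-- binary-search correctness on a sorted list
lemma bisectRightAux_spec (a : List Int) (x : Int)
    (hs : List.Pairwise (· ≤ ·) a) :
    ∀ (lo hi : Nat), lo ≤ hi → hi ≤ a.length →
    (∀ j, j < lo → a.getD j 0 ≤ x) →
    (∀ j, hi ≤ j → j < a.length → x < a.getD j 0) →
    bisectRightAux a x lo hi ≤ hi ∧
    (∀ j, j < bisectRightAux a x lo hi → a.getD j 0 ≤ x) ∧
    (∀ j, bisectRightAux a x lo hi ≤ j → j < a.length → x < a.getD j 0) := by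
  intro lo hi
  induction lo, hi using bisectRightAux.induct (a := a) (x := x) with
  | case1 lo hi h hlt ih =>
    intro _hlohi hhi hlow hhigh
    rw [bisectRightAux, if_pos h, if_pos hlt]
    have h1 := ih (by omega) (by omega) hlow
      (fun j hj hjl => lt_of_lt_of_le hlt (sorted_getD_mono a hs hj hjl))
    exact ⟨le_trans h1.1 (by omega), h1.2.1, h1.2.2⟩
  | case2 lo hi h hge ih =>
    intro _hlohi hhi hlow hhigh
    rw [bisectRightAux, if_pos h, if_neg hge]
    have h1 := ih (by omega) hhi
      (fun j hj => le_trans (sorted_getD_mono a hs (by omega) (by omega)) (not_lt.mp hge))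
      hhigh
    exact ⟨h1.1, h1.2.1, h1.2.2⟩
  | case3 lo hi h =>
    intro hlohi hhi hlow hhigh
    rw [bisectRightAux, if_neg h]
    exact ⟨hlohi, fun j hj => hlow j hj, fun j hj hjl => hhigh j (by omega) hjl⟩

lemma bisectRightB_le (a : List Int) (x : Int) (hs : List.Pairwise (· ≤ ·) a) :
    bisectRightB a x ≤ a.length := by
  unfold bisectRightB
  exact (bisectRightAux_spec a x hs 0 a.length (Nat.zero_le _) le_rfl
    (by omega) (fun j hj hjl => absurd hj (by omega))).1

lemma bisectRightB_iff (a : List Int) (x : Int) (hs : List.Pairwise (· ≤ ·) a)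
    {j : Nat} (hj : j < a.length) :
    a.getD j 0 ≤ x ↔ j < bisectRightB a x := by
  unfold bisectRightB
  have h := bisectRightAux_spec a x hs 0 a.length (Nat.zero_le _) le_rfl
    (by omega) (fun j hj hjl => absurd hj (by omega))
  constructor
  · intro hle
    by_contra hnot
    exact absurd hle (not_le.mpr (h.2.2 j (by omega) hj))
  · intro hlt; exact h.2.1 j hlt

-- A's loop computes exactly the running maximum B computes: two inequalities.
lemma minRemovalV2Loop_le (s : List Int) (k : Int)
    (hs : List.Pairwise (· ≤ ·) s) :
    ∀ (i j : Nat) (mc : Int), i ≤ j → mc ≤ foldB s k →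
    minRemovalV2Loop s k i j mc ≤ foldB s k := by
  intro i j mc
  induction i, j, mc using minRemovalV2Loop.induct (s := s) (k := k) with
  | case1 i j mc h hcond ih =>
    intro hij hmc
    rw [minRemovalV2Loop, dif_pos h, if_pos hcond]
    apply ih (by omega)
    have hiR : gB s k i ≤ foldB s k :=
      foldl_max_arg_le _ _ _ (List.mem_range.mpr (by omega))
    apply max_le hmc
    rcases hcond with hcond | hcond
    · have he : (j : Int) - (i : Int) + 1 = 1 := by rw [hcond]; ring
      rw [he]
      exact le_trans (le_max_left _ _) hiR
    · have hlt : j < bisectRightB s (s.getD i 0 * k) :=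
        (bisectRightB_iff s _ hs h).mp hcond
      calc (j : Int) - (i : Int) + 1
          ≤ (bisectRightB s (s.getD i 0 * k) : Int) - (i : Int) := by
            have : (j : Int) + 1 ≤ (bisectRightB s (s.getD i 0 * k) : Int) := by
              exact_mod_cast hlt
            omega
        _ ≤ gB s k i := le_max_right _ _
        _ ≤ foldB s k := hiR
  | case2 i j mc h hcond hlt ih =>
    intro hij hmc
    rw [minRemovalV2Loop, dif_pos h, if_neg hcond, dif_pos hlt]
    exact ih (by omega) hmc
  | case3 i j mc h hcond hge =>
    intro hij hmc
    rw [minRemovalV2Loop, dif_pos h, if_neg hcond, dif_neg hge]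
    exact hmc
  | case4 i j mc h =>
    intro hij hmc
    rw [minRemovalV2Loop, dif_neg h]
    exact hmc

lemma minRemovalV2Loop_ge (s : List Int) (k : Int)
    (hs : List.Pairwise (· ≤ ·) s) :
    ∀ (i j : Nat) (mc : Int), i ≤ j → j ≤ s.length →
    (j : Int) - (i : Int) ≤ mc →
    (∀ i', i' < i → gB s k i' ≤ mc) →
    foldB s k ≤ minRemovalV2Loop s k i j mc := by
  intro i j mc
  induction i, j, mc using minRemovalV2Loop.induct (s := s) (k := k) with
  | case1 i j mc h hcond ih =>
    intro hij hjn hwin hdone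
    rw [minRemovalV2Loop, dif_pos h, if_pos hcond]
    apply ih (by omega) (by omega)
    · have : (j : Int) - (i : Int) + 1 ≤ max mc ((j : Int) - (i : Int) + 1) :=
        le_max_right _ _
      push_cast; omega
    · exact fun i' hi' => le_trans (hdone i' hi') (le_max_left _ _)
  | case2 i j mc h hcond hlt ih =>
    intro hij hjn hwin hdone
    rw [minRemovalV2Loop, dif_pos h, if_neg hcond, dif_pos hlt]
    apply ih (by omega) hjn (by push_cast at hwin ⊢; omega)
    intro i' hi'
    rcases Nat.lt_or_ge i' i with hi | hi
    · exact hdone i' hi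
    · have hii : i' = i := by omega
      subst hii
      -- the window test failed and i' < j, so bisectRightB ≤ j and gB i' ≤ j - i' ≤ mc
      have hnot : ¬ s.getD j 0 ≤ s.getD i' 0 * k := by
        intro hcc; exact hcond (Or.inr hcc)
      have hble : bisectRightB s (s.getD i' 0 * k) ≤ j := by
        by_contra hbb
        exact hnot ((bisectRightB_iff s _ hs h).mpr (by omega))
      have h1 : (bisectRightB s (s.getD i' 0 * k) : Int) - (i' : Int) ≤ (j : Int) - (i' : Int) := by
        have : (bisectRightB s (s.getD i' 0 * k) : Int) ≤ (j : Int) := by exact_mod_cast hble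
        omega
      have h2 : (1 : Int) ≤ (j : Int) - (i' : Int) := by
        have : (i' : Int) < (j : Int) := by exact_mod_cast hlt
        omega
      exact le_trans (max_le (le_trans h2 hwin) (le_trans h1 hwin)) le_rfl
  | case3 i j mc h hcond hge =>
    -- unreachable under the invariant i ≤ j: the window test only fails when i ≠ j
    intro hij hjn hwin hdone
    exact absurd (Or.inl (by omega)) hcond
  | case4 i j mc h =>
    intro hij hjn hwin hdone
    rw [minRemovalV2Loop, dif_neg h]
    -- j = length; every remaining start i' ≥ i has window ≤ length - i' ≤ j - i ≤ mc
    have hjlen : j = s.length := by omega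
    apply foldl_max_le
    · intro x hx
      have hxn : x < s.length := List.mem_range.mp hx
      rcases Nat.lt_or_ge x i with hxi | hxi
      · exact hdone x hxi
      · have hin : i < s.length := by omega
        have hb : bisectRightB s (s.getD x 0 * k) ≤ s.length := bisectRightB_le _ _ hs
        have h1 : (bisectRightB s (s.getD x 0 * k) : Int) - (x : Int) ≤ mc := by
          have hb2 : (bisectRightB s (s.getD x 0 * k) : Int) ≤ (s.length : Int) := by
            exact_mod_cast hb
          have h3 : (j : Int) = (s.length : Int) := by exact_mod_cast hjlen
          have h4 : (i : Int) ≤ (x : Int) := by exact_mod_cast hxi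
          omega
        have h2 : (1 : Int) ≤ mc := by
          have h3 : (j : Int) = (s.length : Int) := by exact_mod_cast hjlen
          have hin2 : (i : Int) < (s.length : Int) := by exact_mod_cast hin
          omega
        exact max_le h2 h1
    · omega

-- bridging B's port to foldB
lemma alt_eq_foldB (nums : List Int) (k : Int) :
    minRemovalV2_alt nums k =
      ((PySem.List.sorted nums (fun x => x)).length : Int) -
        foldB (PySem.List.sorted nums (fun x => x)) k := rfl

-- ===== VERDICT (by name: the statement is the Claim_ definition above) =====
theorem minRemovalV2_spec : Claim_equal_minRemovalV2 := by
  intro nums k _dom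
  unfold Spec_minRemovalV2
  rw [alt_eq_foldB]
  show ((PySem.List.sorted nums (fun x => x)).length : Int) -
      minRemovalV2Loop (PySem.List.sorted nums (fun x => x)) k 0 0 0 = _
  have hs : List.Pairwise (· ≤ ·) (PySem.List.sorted nums (fun x => x)) :=
    PySem.List.sorted_pairwise nums (fun x => x)
  have hle := minRemovalV2Loop_le (PySem.List.sorted nums (fun x => x)) k hs 0 0 0 le_rfl
    (foldl_max_init_le _ _ _)
  have hge := minRemovalV2Loop_ge (PySem.List.sorted nums (fun x => x)) k hs 0 0 0 le_rfl
    (Nat.zero_le _) (by omega) (by omega)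
  rw [le_antisymm hle hge]
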